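-- pv_equiv track=rewrite | github.com/perrinod/hacker-rank-solutions | Algorithms/Strings/Making Anagrams/solution.py | makingAnagrams
-- ===== SOURCE A (Python) =====
-- def makingAnagrams(s1, s2):
--     count = 0
--
--     for i in range(0, len(s1)):
--             found = s2.find(s1[i])
--             if(found != -1):
--                 s2 = s2[:found] + s2[found+1:]
--                 count += 1
--
--     return len(s1) - count + len(s2)
-- ===== SOURCE B (Python) =====
-- def makingAnagrams(s1, s2):
--     c1 = {}
--     for ch in s1:
--         c1[ch] = c1.get(ch, 0) + 1
--     c2 = {}
--     for ch in s2:
--         c2[ch] = c2.get(ch, 0) + 1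
--     total = 0
--     for ch in c1:
--         d = c1[ch] - c2.get(ch, 0)
--         total += d if d > 0 else -d
--     for ch in c2:
--         if ch not in c1:
--             total += c2[ch]
--     return total
-- ===== Notes on version B (the rewrite author's own statement) =====
-- stated objective: faster
-- what changed: Replaces A's per-character find-and-rebuild of s2 (quadratic repeated string scans and slicing) with two frequency dictionaries built in one pass each; the answer is the sum of absolute count differences, so the inner scan disappears.
import Mathlib
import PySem

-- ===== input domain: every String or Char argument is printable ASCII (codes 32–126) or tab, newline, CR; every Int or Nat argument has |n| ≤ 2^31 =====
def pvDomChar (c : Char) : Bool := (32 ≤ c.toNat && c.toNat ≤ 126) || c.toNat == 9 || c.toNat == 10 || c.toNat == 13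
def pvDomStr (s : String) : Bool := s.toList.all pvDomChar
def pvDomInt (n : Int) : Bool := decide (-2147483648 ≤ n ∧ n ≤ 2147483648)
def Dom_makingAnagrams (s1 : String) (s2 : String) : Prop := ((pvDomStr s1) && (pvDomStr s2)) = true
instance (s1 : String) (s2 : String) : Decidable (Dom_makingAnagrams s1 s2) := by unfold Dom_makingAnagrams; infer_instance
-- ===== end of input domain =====

-- B replaces A's per-character find-and-rebuild of s2 with two frequency dictionaries and
-- a sum of absolute count differences (objective: faster, one pass per string).

-- ===== PORT A =====
-- loop body of A: found = s2.find(s1[i]); if found != -1: s2 = s2[:found] + s2[found+1:]; count += 1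
def stepA (st : List Char × Int) (c : Char) : List Char × Int :=
  let found := PySem.Chars.find st.1 [c]
  if found ≠ -1 then
    (PySem.List.slice st.1 none (some found) ++ PySem.List.slice st.1 (some (found + 1)) none, st.2 + 1)
  else st

def makingAnagrams (s1 : String) (s2 : String) : Int :=
  let p := s1.toList.foldl stepA (s2.toList, 0)
  (s1.toList.length : Int) - p.2 + (p.1.length : Int)

-- ===== PORT B =====
-- helper of B: build a frequency dict (c[ch] = c.get(ch, 0) + 1)
def countUp (l : List Char) : PySem.Dict Char Int :=
  l.foldl (fun d ch => d.insert ch (d.getD ch 0 + 1)) PySem.Dict.empty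

def makingAnagrams_alt (s1 : String) (s2 : String) : Int :=
  let c1 := countUp s1.toList
  let c2 := countUp s2.toList
  let total := c1.keys.foldl (fun acc ch =>
      let d := c1.getD ch 0 - c2.getD ch 0
      acc + (if d > 0 then d else -d)) 0
  c2.keys.foldl (fun acc ch => if !(c1.contains ch) then acc + c2.getD ch 0 else acc) total

-- ===== PRECONDITION & SPEC =====
def Spec_makingAnagrams (s1 : String) (s2 : String) (out : Int) : Prop := out = makingAnagrams_alt s1 s2
instance (s1 : String) (s2 : String) (out : Int) : Decidable (Spec_makingAnagrams s1 s2 out) := by unfold Spec_makingAnagrams; infer_instance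

-- ===== CLAIM (what is proved, stated in full; the proofs are below) =====
def Claim_equal_makingAnagrams : Prop := ∀ (s1 : String) (s2 : String), Dom_makingAnagrams s1 s2 → Spec_makingAnagrams s1 s2 (makingAnagrams s1 s2)

-- ===== LEMMAS AND PROOFS =====

-- |·| in the if-form both ports use
def absInt (n : Int) : Int := if n > 0 then n else -n

-- A's loop, restated structurally: matched characters are erased, matches are counted
def cleanPair : List Char → List Char → (List Char × Int)
  | [], l2 => (l2, 0)
  | c :: t, l2 =>
    if c ∈ l2 then
      let p := cleanPair t (l2.erase c)
      (p.1, p.2 + 1)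
    else cleanPair t l2

-- [c] is an infix of l iff c is an element
lemma singleton_infix_iff (c : Char) (l : List Char) : [c] <:+: l ↔ c ∈ l := by
  constructor
  · intro h; exact h.mem (List.mem_singleton_self c)
  · intro h
    obtain ⟨s, t, rfl⟩ := List.append_of_mem h
    exact ⟨s, t, by simp⟩

-- removing the first occurrence via take/drop is List.erase
lemma take_drop_eq_erase (c : Char) :
    ∀ (l : List Char) (i : Nat), l[i]? = some c → (∀ j, j < i → l[j]? ≠ some c) →
      l.take i ++ l.drop (i + 1) = l.erase c := by
  intro l
  induction l with
  | nil => intro i h _; simp at h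
  | cons a t ih =>
    intro i h hmin
    cases i with
    | zero =>
      simp only [List.getElem?_cons_zero, Option.some.injEq] at h
      subst h
      simp
    | succ i =>
      have ha : a ≠ c := by
        intro e
        exact hmin 0 (Nat.succ_pos _) (by simp [e])
      have h' : t[i]? = some c := by simpa using h
      have hmin' : ∀ j, j < i → t[j]? ≠ some c := by
        intro j hj
        have := hmin (j + 1) (Nat.succ_lt_succ hj)
        simpa using this
      simp [ha, List.take_succ_cons, List.drop_succ_cons, ih i h' hmin']

-- the A-step is: erase the char if present, and count
lemma stepA_eq (l2 : List Char) (cnt : Int) (c : Char) :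
    stepA (l2, cnt) c = if c ∈ l2 then (l2.erase c, cnt + 1) else (l2, cnt) := by
  by_cases h : c ∈ l2
  · have hne : PySem.Chars.find l2 [c] ≠ -1 :=
      (PySem.Chars.find_ne_neg_one_iff l2 [c]).mpr ((singleton_infix_iff c l2).mpr h)
    have hz : PySem.Chars.findFrom l2 [c] ((0 : Nat) : Int) ≠ -1 := by
      rw [Nat.cast_zero, PySem.Chars.findFrom_zero]; exact hne
    obtain ⟨hle, hpre, hmin⟩ := PySem.Chars.findFrom_natCast_spec l2 [c] 0 (Nat.zero_le _) hz
    rw [Nat.cast_zero, PySem.Chars.findFrom_zero] at hle hpre hmin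
    have h0 : (0 : Int) ≤ PySem.Chars.find l2 [c] := by exact_mod_cast hle
    obtain ⟨r, hr⟩ := hpre
    have hget : l2[(PySem.Chars.find l2 [c]).toNat]? = some c := by
      have h1 : (l2.drop (PySem.Chars.find l2 [c]).toNat)[0]? = some c := by
        rw [← hr]; rfl
      rwa [List.getElem?_drop, Nat.add_zero] at h1
    have hminj : ∀ j, j < (PySem.Chars.find l2 [c]).toNat → l2[j]? ≠ some c := by
      intro j hj he
      apply hmin j (Nat.zero_le _) hj
      obtain ⟨hjlen, hv⟩ := List.getElem?_eq_some_iff.mp he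
      refine ⟨l2.drop (j + 1), ?_⟩
      rw [List.drop_eq_getElem_cons hjlen, hv]
      rfl
    have ht : (PySem.Chars.find l2 [c] + 1).toNat = (PySem.Chars.find l2 [c]).toNat + 1 := by
      omega
    simp only [stepA, if_pos h, hne, if_true, ne_eq, not_false_eq_true]
    rw [PySem.List.slice_to _ h0, PySem.List.slice_from _ (by omega : (0:Int) ≤ PySem.Chars.find l2 [c] + 1)]
    rw [ht, take_drop_eq_erase c l2 _ hget hminj]
  · have heq : PySem.Chars.find l2 [c] = -1 := by
      rw [PySem.Chars.find_eq_neg_one_iff, singleton_infix_iff]; exact h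
    simp [stepA, heq, h]

-- A's foldl is cleanPair
lemma foldA (l1 : List Char) : ∀ (l2 : List Char) (cnt : Int),
    l1.foldl stepA (l2, cnt) = ((cleanPair l1 l2).1, cnt + (cleanPair l1 l2).2) := by
  induction l1 with
  | nil => intro l2 cnt; simp [cleanPair]
  | cons c t ih =>
    intro l2 cnt
    rw [List.foldl_cons, stepA_eq]
    by_cases h : c ∈ l2
    · rw [if_pos h, ih]
      simp only [cleanPair, if_pos h]
      exact Prod.ext rfl (by dsimp; omega)
    · rw [if_neg h, ih]
      simp only [cleanPair, if_neg h]

-- a list length is the sum of its counts over any superset of its elements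
lemma sum_count_eq_length (S : Finset Char) :
    ∀ (l : List Char), (∀ x ∈ l, x ∈ S) → ∑ x ∈ S, (l.count x : Int) = l.length := by
  intro l
  induction l with
  | nil => intro _; simp
  | cons a t ih =>
    intro hS
    have ha : a ∈ S := hS a (List.mem_cons_self)
    have step : ∀ x ∈ S, ((a :: t).count x : Int) = (t.count x : Int) + if x = a then 1 else 0 := by
      intro x _
      by_cases e : x = a
      · subst e; simp [List.count_cons_self]
      · simp [List.count_cons_of_ne (Ne.symm e), e]
    rw [Finset.sum_congr rfl step, Finset.sum_add_distrib,
      Finset.sum_ite_eq' S a (fun _ => (1 : Int)),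
      ih (fun x hx => hS x (List.mem_cons_of_mem _ hx))]
    simp [ha]

-- the value A computes equals the sum of absolute count differences
lemma clean_eq_sum (l1 : List Char) : ∀ (S : Finset Char) (l2 : List Char),
    (∀ x ∈ l1, x ∈ S) → (∀ x ∈ l2, x ∈ S) →
    (l1.length : Int) - (cleanPair l1 l2).2 + ((cleanPair l1 l2).1.length : Int)
      = ∑ x ∈ S, absInt ((l1.count x : Int) - (l2.count x : Int)) := by
  induction l1 with
  | nil =>
    intro S l2 _ h2
    have hterm : ∀ x ∈ S, absInt ((List.count x ([] : List Char) : Int) - (l2.count x : Int))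
        = (l2.count x : Int) := by
      intro x _
      simp only [List.count_nil, Nat.cast_zero, absInt]
      split_ifs <;> omega
    rw [Finset.sum_congr rfl hterm, sum_count_eq_length S l2 h2]
    simp [cleanPair]
  | cons c t ih =>
    intro S l2 h1 h2
    have hcS : c ∈ S := h1 c (by simp)
    have h1t : ∀ x ∈ t, x ∈ S := fun x hx => h1 x (by simp [hx])
    by_cases h : c ∈ l2
    · have h2' : ∀ x ∈ l2.erase c, x ∈ S := fun x hx => h2 x (List.mem_of_mem_erase hx)
      have ihe := ih S (l2.erase c) h1t h2'
      have hcong : ∀ x ∈ S, absInt (((c :: t).count x : Int) - (l2.count x : Int))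
          = absInt ((t.count x : Int) - ((l2.erase c).count x : Int)) := by
        intro x _
        by_cases e : x = c
        · subst e
          have hp : 0 < List.count x l2 := List.count_pos_iff.mpr h
          congr 1
          rw [List.count_cons_self, List.count_erase_self]
          omega
        · congr 1
          rw [List.count_cons_of_ne (Ne.symm e), List.count_erase_of_ne e]
      rw [Finset.sum_congr rfl hcong, ← ihe]
      simp only [cleanPair, if_pos h, List.length_cons]
      push_cast
      ring
    · have ihe := ih S l2 h1t h2
      rw [← Finset.add_sum_erase S _ hcS]
      rw [← Finset.add_sum_erase S _ hcS] at ihe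
      have h0 : List.count c l2 = 0 := List.count_eq_zero.mpr h
      have hterm : absInt (((c :: t).count c : Int) - (l2.count c : Int))
          = absInt ((t.count c : Int) - (l2.count c : Int)) + 1 := by
        rw [List.count_cons_self, h0]
        simp only [absInt]
        split_ifs <;> omega
      have hcong : ∀ x ∈ S.erase c, absInt (((c :: t).count x : Int) - (l2.count x : Int))
          = absInt ((t.count x : Int) - (l2.count x : Int)) := by
        intro x hx
        congr 1
        rw [List.count_cons_of_ne (Ne.symm (Finset.mem_erase.mp hx).1)]
      rw [Finset.sum_congr rfl hcong, hterm]
      simp only [cleanPair, if_neg h, List.length_cons]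
      push_cast
      linarith [ihe]

-- B computes the same sum
lemma alt_eq_sum (s1 s2 : String) :
    makingAnagrams_alt s1 s2
      = ∑ x ∈ (s1.toList ++ s2.toList).toFinset,
          absInt ((s1.toList.count x : Int) - (s2.toList.count x : Int)) := by
  simp only [makingAnagrams_alt, countUp,
    PySem.Dict.foldl_insert_getD_add_one_eq_counter, PySem.Dict.keys_counter,
    PySem.Dict.getD_counter, PySem.Dict.contains_counter]
  rw [PySem.List.foldl_if_eq_foldl_filter]
  rw [PySem.List.foldl_add, PySem.List.foldl_add, zero_add]
  have n1 : (PySem.Set.ofList s1.toList).Nodup := PySem.Set.nodup_ofList s1.toList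
  have n2 : ((PySem.Set.ofList s2.toList).filter
      (fun ch => !(s1.toList.contains ch))).Nodup :=
    (PySem.Set.nodup_ofList s2.toList).filter _
  rw [← List.sum_toFinset _ n1, ← List.sum_toFinset _ n2]
  have e1 : (PySem.Set.ofList s1.toList).toFinset = s1.toList.toFinset := by
    ext x; simp [PySem.Set.mem_ofList]
  have e2 : ((PySem.Set.ofList s2.toList).filter
      (fun ch => !(s1.toList.contains ch))).toFinset
      = s2.toList.toFinset \ s1.toList.toFinset := by
    ext x
    simp [PySem.Set.mem_ofList]
  rw [e1, e2, List.toFinset_append, ← Finset.union_sdiff_self_eq_union,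
    Finset.sum_union Finset.disjoint_sdiff]
  congr 1
  refine Finset.sum_congr rfl (fun x hx => ?_)
  have hx1 : x ∉ s1.toList := by
    have := (Finset.mem_sdiff.mp hx).2
    simpa using this
  have hc : List.count x s1.toList = 0 := List.count_eq_zero.mpr hx1
  simp only [absInt, hc, Nat.cast_zero]
  split_ifs <;> omega

-- ===== VERDICT (by name: the statement is the Claim_ definition above) =====
theorem makingAnagrams_spec : Claim_equal_makingAnagrams := by
  intro s1 s2 _
  unfold Spec_makingAnagrams makingAnagrams
  rw [foldA, alt_eq_sum]
  simpa using clean_eq_sum s1.toList (s1.toList ++ s2.toList).toFinset s2.toList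
    (by intro x hx; simp [hx]) (by intro x hx; simp [hx])
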